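-- pv_equiv track=rewrite | github.com/krrishrocks009/TreeHouse_Django_course | treehouse/dict2.py | courses
-- ===== SOURCE A (Python) =====
-- def courses(teachers):
--     total_courses = []
--     end_result = []
--     for key in teachers.items():
--         total_courses.append(teachers.values())
--     for courses_of_one_teacher in teachers.values():
--         for course in courses_of_one_teacher:
--             end_result.append(course)
--     return len(end_result)
-- ===== SOURCE B (Python) =====
-- def courses(teachers):
--     return sum(len(v) for v in teachers.values())
-- ===== Notes on version B (the rewrite author's own statement) =====
-- stated objective: simpler
-- what changed: B sums each teacher's list length in one pass instead of flattening every course into a list (and drops A's dead first loop) ; same O(total) but no per-course append.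
import Mathlib
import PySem

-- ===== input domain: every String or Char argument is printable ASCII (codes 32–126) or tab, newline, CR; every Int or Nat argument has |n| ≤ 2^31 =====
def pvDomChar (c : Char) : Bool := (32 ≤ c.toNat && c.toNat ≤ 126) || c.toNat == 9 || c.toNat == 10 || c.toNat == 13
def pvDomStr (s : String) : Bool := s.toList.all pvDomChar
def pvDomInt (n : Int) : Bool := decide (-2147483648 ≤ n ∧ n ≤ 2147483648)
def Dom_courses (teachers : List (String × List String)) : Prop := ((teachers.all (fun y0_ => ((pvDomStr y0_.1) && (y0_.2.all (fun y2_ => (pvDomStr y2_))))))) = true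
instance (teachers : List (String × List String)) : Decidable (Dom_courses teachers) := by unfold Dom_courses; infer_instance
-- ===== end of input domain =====

-- B computes the total by summing each teacher's list length in one pass, dropping A's dead first loop and the flattened list (objective: simpler).
-- ===== PORT A =====
def courses (teachers : List (String × List String)) : Int :=
  -- total_courses loop is dead: it appends teachers.values() per item, unused
  let total_courses : List (List (List String)) :=
    teachers.foldl (fun acc _ => acc ++ [teachers.map Prod.snd]) []
  let end_result : List String :=
    teachers.foldl (fun acc p => p.2.foldl (fun a c => a ++ [c]) acc) []
  (end_result.length : Int)

-- ===== PORT B =====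
def courses_alt (teachers : List (String × List String)) : Int :=
  ((teachers.map (fun p => p.2.length)).sum : Int)

-- ===== PRECONDITION & SPEC =====
def Spec_courses (teachers : List (String × List String)) (out : Int) : Prop := out = courses_alt teachers
instance (teachers : List (String × List String)) (out : Int) : Decidable (Spec_courses teachers out) := by unfold Spec_courses; infer_instance

-- ===== CLAIM (what is proved, stated in full; the proofs are below) =====
def Claim_equal_courses : Prop := ∀ (teachers : List (String × List String)), Dom_courses teachers → Spec_courses teachers (courses teachers)

-- ===== LEMMAS AND PROOFS =====

-- ===== LEMMAS =====
lemma end_result_len (teachers : List (String × List String)) (acc : List String) :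
    (teachers.foldl (fun acc p => p.2.foldl (fun a c => a ++ [c]) acc) acc).length
      = acc.length + (teachers.map (fun p => p.2.length)).sum := by
  induction teachers generalizing acc with
  | nil => simp
  | cons h t ih =>
      simp only [List.foldl_cons, ih, List.map_cons, List.sum_cons]
      have : ∀ (l : List String) (a : List String),
          l.foldl (fun a c => a ++ [c]) a = a ++ l := by
        intro l; induction l with
        | nil => simp
        | cons x xs ih2 => intro a; simp [ih2]
      rw [this]; simp; omega

-- ===== VERDICT (by name: the statement is the Claim_ definition above) =====
theorem courses_spec : Claim_equal_courses := by
  intro teachers _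
  unfold Spec_courses courses courses_alt
  simp only [end_result_len, List.length_nil, Nat.zero_add]
  rw [Nat.cast_list_sum, List.map_map]
  rfl
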